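-- pv_equiv track=rewrite | github.com/iVGeek/malbolge-toolkit | src/assembler/ternary_encoder.py | to_ternary
-- ===== SOURCE A (Python) =====
-- def to_ternary(decimal):
--     """Convert decimal number to ternary representation"""
--     if decimal == 0:
--         return [0]
--
--     digits = []
--     num = decimal
--
--     while num > 0:
--         digits.append(num % 3)
--         num //= 3
--
--     return digits[::-1]
-- ===== SOURCE B (Python) =====
-- def to_ternary(decimal):
--     """Convert decimal number to ternary representation (most-significant digit first)."""
--     if decimal == 0:
--         return [0]
--     if decimal < 0:
--         return []
--     p = 1
--     while p * 3 <= decimal: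
--         p *= 3
--     digits = []
--     while p >= 1:
--         digits.append(decimal // p)
--         decimal %= p
--         p //= 3
--     return digits
-- ===== Notes on version B (the rewrite author's own statement) =====
-- stated objective: alternative
-- what changed: B emits the ternary digits most-significant-first by first growing a power-of-three accumulator to the highest power <= decimal and then repeatedly dividing by it, eliminating A's append-then-reverse pass.
import Mathlib
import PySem

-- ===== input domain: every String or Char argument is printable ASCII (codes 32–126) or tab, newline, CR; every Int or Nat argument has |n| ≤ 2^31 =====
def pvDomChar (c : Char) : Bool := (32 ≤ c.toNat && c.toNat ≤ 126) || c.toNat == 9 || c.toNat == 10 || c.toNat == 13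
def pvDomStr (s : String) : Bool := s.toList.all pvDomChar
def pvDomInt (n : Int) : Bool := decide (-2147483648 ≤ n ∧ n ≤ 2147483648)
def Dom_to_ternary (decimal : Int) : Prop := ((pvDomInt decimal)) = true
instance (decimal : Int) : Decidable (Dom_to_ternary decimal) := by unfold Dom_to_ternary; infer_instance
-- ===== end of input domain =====

-- B converts decimal to ternary most-significant digit first via a power-of-three
-- accumulator, eliminating A's append-then-reverse pass (same cost; objective: alternative).

-- ===== PORT A =====
-- while num > 0: digits.append(num % 3); num //= 3
def to_ternary_loop (num : Int) (digits : List Int) : List Int :=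
  if 0 < num then
    to_ternary_loop (PySem.Int.floordiv num 3) (digits ++ [PySem.Int.mod num 3])
  else digits
termination_by num.toNat
decreasing_by
  have h3 : PySem.Int.floordiv num 3 = num / 3 := PySem.Int.floordiv_eq_ediv_of_pos (by omega)
  rw [h3]; omega

def to_ternary (decimal : Int) : List Int :=
  if decimal = 0 then [0]
  else
    -- digits[::-1]
    (PySem.List.slice? (to_ternary_loop decimal []) none none (-1)).getD []

-- ===== PORT B =====
-- while p * 3 <= decimal: p *= 3   (0 < p guard only makes the recursion total; p starts at 1)
def growP (decimal p : Int) : Int :=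
  if h : 0 < p ∧ p * 3 ≤ decimal then growP decimal (p * 3) else p
termination_by (decimal - p).toNat
decreasing_by omega

-- while p >= 1: digits.append(decimal // p); decimal %= p; p //= 3
def emitDigits (decimal p : Int) (digits : List Int) : List Int :=
  if 1 ≤ p then
    emitDigits (PySem.Int.mod decimal p) (PySem.Int.floordiv p 3)
      (digits ++ [PySem.Int.floordiv decimal p])
  else digits
termination_by p.toNat
decreasing_by
  have h3 : PySem.Int.floordiv p 3 = p / 3 := PySem.Int.floordiv_eq_ediv_of_pos (by omega)
  rw [h3]; omega

def to_ternary_alt (decimal : Int) : List Int :=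
  if decimal = 0 then [0]
  else if decimal < 0 then []
  else emitDigits decimal (growP decimal 1) []

-- ===== PRECONDITION & SPEC =====
def Spec_to_ternary (decimal : Int) (out : List Int) : Prop := out = to_ternary_alt decimal
instance (decimal : Int) (out : List Int) : Decidable (Spec_to_ternary decimal out) := by unfold Spec_to_ternary; infer_instance

-- ===== CLAIM (what is proved, stated in full; the proofs are below) =====
def Claim_equal_to_ternary : Prop := ∀ (decimal : Int), Dom_to_ternary decimal → Spec_to_ternary decimal (to_ternary decimal)

-- ===== LEMMAS AND PROOFS =====

-- reference: most-significant-first digits, empty for n ≤ 0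
def msd (n : Int) : List Int :=
  if 0 < n then msd (n / 3) ++ [n % 3] else []
termination_by n.toNat
decreasing_by omega

theorem to_ternary_loop_eq (num : Int) (digits : List Int) :
    to_ternary_loop num digits = digits ++ (msd num).reverse := by
  fun_induction to_ternary_loop num digits with
  | case1 num digits h ih =>
    rw [ih, PySem.Int.floordiv_eq_ediv_of_pos (by omega : (0:Int) < 3),
      PySem.Int.mod_eq_emod_of_pos (by omega : (0:Int) < 3)]
    conv_rhs => rw [msd, if_pos h]
    simp
  | case2 num digits h =>
    rw [msd, if_neg h]
    simp

-- pad-free top-down representation with k+1 digits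
def rep : Nat → Int → List Int
  | 0, n => [n]
  | (k+1), n => (n / 3 ^ (k+1)) :: rep k (n % 3 ^ (k+1))

theorem rep_peel (k : Nat) : ∀ n : Int, 0 ≤ n →
    rep (k+1) n = rep k (n / 3) ++ [n % 3] := by
  induction k with
  | zero => intro n hn; simp [rep]
  | succ k ih =>
    intro n hn
    obtain ⟨m, rfl⟩ := Int.eq_ofNat_of_zero_le hn
    have hmod : (0:Int) ≤ (m:ℤ) % 3 ^ (k+2) := Int.emod_nonneg _ (by positivity)
    have e1 : (m:ℤ) / 3 ^ (k+2) = ((m:ℤ)/3) / 3 ^ (k+1) := by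
      have : (m:ℤ) / 3 / 3 ^ (k+1) = ((m / 3 / 3 ^ (k+1) : ℕ) : ℤ) := by push_cast; ring
      rw [this, Nat.div_div_eq_div_mul]
      push_cast [mul_comm 3 (3 ^ (k+1)), ← pow_succ]
      ring
    have e2 : ((m:ℤ) % 3 ^ (k+2)) / 3 = ((m:ℤ)/3) % 3 ^ (k+1) := by
      have h1 : ((m:ℤ) % 3 ^ (k+2)) / 3 = ((m % 3 ^ (k+2) / 3 : ℕ) : ℤ) := by push_cast; ring
      have h2 : ((m:ℤ)/3) % 3 ^ (k+1) = ((m / 3 % 3 ^ (k+1) : ℕ) : ℤ) := by push_cast; ring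
      rw [h1, h2]
      have h3 : (3:ℕ) ^ (k+2) = 3 * 3 ^ (k+1) := by ring
      rw [h3, Nat.mod_mul_right_div_self]
    have e3 : ((m:ℤ) % 3 ^ (k+2)) % 3 = (m:ℤ) % 3 := by
      have h1 : ((m:ℤ) % 3 ^ (k+2)) % 3 = ((m % 3 ^ (k+2) % 3 : ℕ) : ℤ) := by push_cast; ring
      rw [h1, Nat.mod_mod_of_dvd m (dvd_pow_self 3 (by omega))]
      push_cast; ring
    show ((m:ℤ) / 3 ^ (k+2)) :: rep (k+1) ((m:ℤ) % 3 ^ (k+2))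
        = rep (k+1) ((m:ℤ)/3) ++ [(m:ℤ) % 3]
    rw [ih _ hmod, e1, e2, e3]
    show ((m:ℤ)/3 / 3 ^ (k+1)) :: (rep k (((m:ℤ)/3) % 3 ^ (k+1)) ++ [(m:ℤ) % 3])
        = (((m:ℤ)/3 / 3 ^ (k+1)) :: rep k (((m:ℤ)/3) % 3 ^ (k+1))) ++ [(m:ℤ) % 3]
    simp

theorem rep_eq_msd (k : Nat) : ∀ n : Int, 3 ^ k ≤ n → n < 3 ^ (k+1) →
    rep k n = msd n := by
  induction k with
  | zero =>
    intro n h1 h2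
    norm_num at h1 h2
    rw [msd, if_pos (by omega), Int.ediv_eq_zero_of_lt (by omega) (by omega),
      msd, if_neg (by omega), Int.emod_eq_of_lt (by omega) (by omega)]
    rfl
  | succ k ih =>
    intro n h1 h2
    have hp : (0:Int) < 3 ^ (k+1) := by positivity
    have hn : (0:Int) < n := lt_of_lt_of_le hp h1
    have b1 : 3 ^ k ≤ n / 3 := by
      rw [Int.le_ediv_iff_mul_le (by omega : (0:Int) < 3)]
      calc (3:Int) ^ k * 3 = 3 ^ (k+1) := by ring
        _ ≤ n := h1
    have b2 : n / 3 < 3 ^ (k+1) := by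
      rw [Int.ediv_lt_iff_lt_mul (by omega : (0:Int) < 3)]
      calc n < 3 ^ (k+2) := h2
        _ = 3 ^ (k+1) * 3 := by ring
    rw [rep_peel k n (by omega), ih _ b1 b2]
    conv_rhs => rw [msd, if_pos hn]

theorem emitDigits_rep (k : Nat) : ∀ (n : Int) (acc : List Int), 0 ≤ n → n < 3 ^ (k+1) →
    emitDigits n (3 ^ k) acc = acc ++ rep k n := by
  induction k with
  | zero =>
    intro n acc hn _
    rw [emitDigits, if_pos (by norm_num),
      PySem.Int.mod_eq_emod_of_pos (by norm_num : (0:Int) < 3 ^ 0),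
      PySem.Int.floordiv_eq_ediv_of_pos (by norm_num : (0:Int) < 3 ^ 0)]
    norm_num
    rw [emitDigits, if_neg (by omega)]
    rfl
  | succ k ih =>
    intro n acc hn hub
    have hp : (0:Int) < 3 ^ (k+1) := by positivity
    rw [emitDigits, if_pos (by omega),
      PySem.Int.mod_eq_emod_of_pos hp, PySem.Int.floordiv_eq_ediv_of_pos hp,
      PySem.Int.floordiv_eq_ediv_of_pos (by omega : (0:Int) < 3)]
    have hdiv : (3:Int) ^ (k+1) / 3 = 3 ^ k := by
      rw [show (3:Int) ^ (k+1) = 3 ^ k * 3 from by ring, Int.mul_ediv_cancel _ (by omega)]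
    rw [hdiv, ih _ _ (Int.emod_nonneg _ (by omega)) (Int.emod_lt_of_pos _ hp)]
    show (acc ++ [n / 3 ^ (k+1)]) ++ rep k (n % 3 ^ (k+1))
        = acc ++ ((n / 3 ^ (k+1)) :: rep k (n % 3 ^ (k+1)))
    simp

theorem growP_pow (decimal p : Int) (hp : 0 < p) (hle : p ≤ decimal) :
    ∃ k : Nat, growP decimal p = p * 3 ^ k ∧ p * 3 ^ k ≤ decimal ∧ decimal < p * 3 ^ (k+1) := by
  by_cases h : p * 3 ≤ decimal
  · obtain ⟨k, e, l, u⟩ := growP_pow decimal (p * 3) (by omega) h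
    refine ⟨k + 1, ?_, ?_, ?_⟩
    · rw [growP, dif_pos ⟨hp, h⟩, e]; ring
    · calc p * 3 ^ (k+1) = p * 3 * 3 ^ k := by ring
        _ ≤ decimal := l
    · calc decimal < p * 3 * 3 ^ (k+1) := u
        _ = p * 3 ^ (k+2) := by ring
  · exact ⟨0, by rw [growP, dif_neg (by tauto)]; simp, by simpa using hle, by simp; omega⟩
termination_by (decimal - p).toNat
decreasing_by omega

-- ===== VERDICT (by name: the statement is the Claim_ definition above) =====
theorem to_ternary_spec : Claim_equal_to_ternary := by
  intro decimal _
  show to_ternary decimal = to_ternary_alt decimal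
  rw [to_ternary, to_ternary_alt]
  by_cases h0 : decimal = 0
  · rw [if_pos h0, if_pos h0]
  · rw [if_neg h0, if_neg h0,
      to_ternary_loop_eq, PySem.List.slice?_none_none_neg_one]
    by_cases hneg : decimal < 0
    · rw [if_pos hneg, msd, if_neg (by omega)]
      rfl
    · rw [if_neg hneg]
      obtain ⟨k, e, l, u⟩ := growP_pow decimal 1 (by omega) (by omega)
      simp only [one_mul] at e l u
      rw [e, emitDigits_rep k decimal [] (by omega) u,
        rep_eq_msd k decimal l u]
      simp
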